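-- pv_equiv track=rewrite | github.com/gehongming/Lemon-python | week_7/excited.py | distinct
-- ===== SOURCE A (Python) =====
-- def distinct(a):
--     b=[]
--     c=''
--     for i in a:
--         if i not in b:
--             b.append(i)
--     b.sort()
--     for i in b:
--         c+=str(i)
--     return c
-- ===== SOURCE B (Python) =====
-- def distinct(a):
--     s = sorted(a)
--     parts = []
--     prev = None
--     first = True
--     for x in s:
--         if first or x != prev:
--             parts.append(str(x))
--             prev = x
--             first = False
--     return ''.join(parts)
-- ===== Notes on version B (the rewrite author's own statement) =====
-- stated objective: faster
-- what changed: Replaces the quadratic membership scan over a growing 'seen' list with sort-first followed by a single adjacent-deduplication pass, joining the pieces at the end instead of repeated string concatenation.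
import Mathlib
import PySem

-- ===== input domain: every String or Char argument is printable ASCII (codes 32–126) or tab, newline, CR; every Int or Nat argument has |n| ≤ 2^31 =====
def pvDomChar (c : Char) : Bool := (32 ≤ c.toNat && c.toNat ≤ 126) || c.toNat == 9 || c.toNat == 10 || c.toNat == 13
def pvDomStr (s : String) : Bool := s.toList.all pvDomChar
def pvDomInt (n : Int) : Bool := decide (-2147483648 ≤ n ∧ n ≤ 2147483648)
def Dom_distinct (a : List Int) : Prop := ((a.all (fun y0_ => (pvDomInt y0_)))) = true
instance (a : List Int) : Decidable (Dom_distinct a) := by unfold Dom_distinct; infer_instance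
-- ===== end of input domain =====

-- B replaces A's quadratic seen-list scan by sort-then-adjacent-dedup in one pass (objective: faster).

-- ===== PORT A =====
-- A: build b by scanning for membership, sort it, then concatenate str(i).
def distinct (a : List Int) : String :=
  let b := a.foldl (fun b i => if i ∈ b then b else b ++ [i]) []
  let b := PySem.List.sorted b (fun x => x) false
  String.mk (b.foldl (fun c i => c ++ PySem.Int.toChars i) [])

-- ===== PORT B =====
-- B: sorted(a), then a single pass keeping x when it is first or differs from prev;
-- state = (prev : Option Int as the first/prev pair, parts accumulated); ''.join = flatten.
def distinct_alt (a : List Int) : String :=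
  let s := PySem.List.sorted a (fun x => x) false
  let r := s.foldl
    (fun (st : Option Int × List (List Char)) x =>
      match st.1 with
      | none => (some x, st.2 ++ [PySem.Int.toChars x])
      | some p => if x ≠ p then (some x, st.2 ++ [PySem.Int.toChars x]) else st)
    (none, [])
  String.mk r.2.flatten

-- ===== PRECONDITION & SPEC =====
def Spec_distinct (a : List Int) (out : String) : Prop := out = distinct_alt a
instance (a : List Int) (out : String) : Decidable (Spec_distinct a out) := by unfold Spec_distinct; infer_instance

-- ===== CLAIM (what is proved, stated in full; the proofs are below) =====
def Claim_equal_distinct : Prop := ∀ (a : List Int), Dom_distinct a → Spec_distinct a (distinct a)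

-- ===== LEMMAS AND PROOFS =====

-- adjacent dedup given the previous kept element
def adjD (p : Int) : List Int → List Int
  | [] => []
  | x :: t => if x = p then adjD p t else x :: adjD x t

theorem mem_adjD (p : Int) (l : List Int) (h : (p :: l).Pairwise (· ≤ ·)) :
    ∀ y, y ∈ adjD p l ↔ (y ∈ l ∧ y ≠ p) := by
  induction l generalizing p with
  | nil => simp [adjD]
  | cons x t ih =>
    rcases List.pairwise_cons.mp h with ⟨hp, ht⟩
    by_cases hx : x = p
    · subst hx
      intro y
      have := ih x ht
      simp [adjD, this y]
      tauto
    · have hpx : p < x := lt_of_le_of_ne (hp x (List.mem_cons_self)) fun e => hx e.symm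
      intro y
      have hy := ih x ht y
      simp [adjD, hx, hy]
      constructor
      · rintro (rfl | ⟨h1, h2⟩)
        · exact ⟨Or.inl rfl, hx⟩
        · refine ⟨Or.inr h1, ?_⟩
          intro rfl_
          have hxy : x ≤ y := (List.pairwise_cons.mp ht).1 y h1
          omega
      · rintro ⟨h1 | h1, h2⟩
        · exact Or.inl h1
        · by_cases hyx : y = x
          · exact Or.inl hyx
          · exact Or.inr ⟨h1, hyx⟩

theorem pairwise_adjD (p : Int) (l : List Int) (h : (p :: l).Pairwise (· ≤ ·)) :
    (p :: adjD p l).Pairwise (· < ·) := by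
  induction l generalizing p with
  | nil => simp [adjD]
  | cons x t ih =>
    rcases List.pairwise_cons.mp h with ⟨hp, ht⟩
    by_cases hx : x = p
    · subst hx
      simpa [adjD] using ih x ht
    · have hpx : p < x := lt_of_le_of_ne (hp x (List.mem_cons_self)) fun e => hx e.symm
      have hrec := ih x ht
      simp only [adjD, hx]
      refine List.pairwise_cons.mpr ⟨?_, hrec⟩
      intro y hy
      rcases List.mem_cons.mp hy with rfl | hy'
      · exact hpx
      · have hyx : y ∈ t := ((mem_adjD x t ht y).mp hy').1
        exact lt_of_lt_of_le hpx ((List.pairwise_cons.mp ht).1 y hyx)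

-- B's loop, after the first element, accumulates the pieces of adjD
theorem loopB (l : List Int) : ∀ (p : Int) (acc : List (List Char)),
    l.foldl
      (fun (st : Option Int × List (List Char)) x =>
        match st.1 with
        | none => (some x, st.2 ++ [PySem.Int.toChars x])
        | some p => if x ≠ p then (some x, st.2 ++ [PySem.Int.toChars x]) else st)
      (some p, acc)
    = (some ((p :: adjD p l).getLast (by simp)), acc ++ (adjD p l).map PySem.Int.toChars) := by
  induction l with
  | nil => intro p acc; simp [adjD]
  | cons x t ih =>
    intro p acc
    by_cases hx : x = p
    · subst hx
      simp only [List.foldl_cons, adjD]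
      simpa using ih x acc
    · simp only [List.foldl_cons, adjD, ne_eq, hx, not_false_iff, if_true]
      rw [ih x (acc ++ [PySem.Int.toChars x])]
      simp [List.getLast_cons]

-- concatenating str(i) over a list is the flatMap of toChars
theorem foldl_concat (xs : List Int) (acc : List Char) :
    xs.foldl (fun c i => c ++ PySem.Int.toChars i) acc = acc ++ xs.flatMap PySem.Int.toChars := by
  induction xs generalizing acc with
  | nil => simp
  | cons x t ih => simp [List.foldl_cons, ih]

-- A's first loop is Python's ordered dedup
theorem foldA_eq_dedup (a : List Int) :
    a.foldl (fun b i => if i ∈ b then b else b ++ [i]) [] = PySem.List.dedup a := by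
  simp only [PySem.List.dedup_eq_ofList, PySem.Set.ofList]
  induction a using List.reverseRecOn with
  | nil => rfl
  | append_singleton t x ih => simp [List.foldl_append, ih, PySem.Set.add]

-- the sorted dedup equals first-element-plus-adjacent-dedup of the sorted list
theorem sorted_dedup_eq (a : List Int) :
    PySem.List.sorted (PySem.List.dedup a) (fun x => x) false
      = (match PySem.List.sorted a (fun x => x) false with
         | [] => []
         | x :: t => x :: adjD x t) := by
  cases hs : PySem.List.sorted a (fun x => x) false with
  | nil =>
    have ha : a = [] := (PySem.List.sorted_eq_nil_iff a (fun x => x) false).mp hs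
    subst ha
    rfl
  | cons x t =>
    have hch : (x :: t).Pairwise (fun a b => (fun y : Int => y) a ≤ (fun y : Int => y) b) := by
      rw [← hs]; exact PySem.List.sorted_pairwise a (fun y => y)
    have hch' : (x :: t).Pairwise (· ≤ ·) := hch
    apply PySem.List.sorted_eq_of_perm_of_pairwise_lt
    · -- (x :: adjD x t).Perm (dedup a)
      have hnd1 : (x :: adjD x t).Nodup := (pairwise_adjD x t hch').imp ne_of_lt
      have hnd2 : (PySem.List.dedup a).Nodup := by
        simp [PySem.List.nodup_dedup a]
      refine (List.perm_ext_iff_of_nodup hnd1 hnd2).mpr ?_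
      intro y
      have hmem : y ∈ x :: t ↔ y ∈ a := by
        rw [← hs]; exact PySem.List.mem_sorted a (fun x => x) false y
      have hd : y ∈ PySem.List.dedup a ↔ y ∈ a := by
        simp [PySem.List.mem_dedup a y]
      rw [hd, ← hmem]
      simp [mem_adjD x t hch' y]
      constructor
      · rintro (rfl | ⟨h1, _⟩)
        · exact Or.inl rfl
        · exact Or.inr h1
      · rintro (rfl | h1)
        · exact Or.inl rfl
        · by_cases hyx : y = x
          · exact Or.inl hyx
          · exact Or.inr ⟨h1, hyx⟩
    · exact pairwise_adjD x t hch'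

-- ===== VERDICT (by name: the statement is the Claim_ definition above) =====
theorem distinct_spec : Claim_equal_distinct := by
  intro a _
  unfold Spec_distinct distinct distinct_alt
  simp only [foldA_eq_dedup, foldl_concat, List.nil_append]
  rw [sorted_dedup_eq]
  cases hs : PySem.List.sorted a (fun x => x) false with
  | nil => simp
  | cons x t =>
    simp only [List.foldl_cons, List.nil_append]
    rw [loopB t x [PySem.Int.toChars x]]
    simp [List.flatMap]
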